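-- pv_equiv track=rewrite | github.com/tcbegley/advent-of-code | 2016/day20.py | part_1
-- ===== SOURCE A (Python) =====
-- def part_1(blacklist):
--     blacklist = sorted(blacklist)
--
--     min_allowed = 0
--     for low, high in blacklist:
--         if min_allowed >= low:
--             min_allowed = max(min_allowed, high + 1)
--         else:
--             break
--
--     return min_allowed
-- ===== SOURCE B (Python) =====
-- def part_1(blacklist):
--     # Fixpoint of repeated full scans instead of sort-then-merge: no sorting at all.
--     blacklist = list(blacklist)
--     candidate = 0
--     changed = True
--     while changed:
--         changed = False
--         for low, high in blacklist:
--             if low <= candidate <= high: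
--                 candidate = high + 1
--                 changed = True
--     return candidate
-- ===== Notes on version B (the rewrite author's own statement) =====
-- stated objective: alternative
-- what changed: Replaces sort-then-single-merge-scan with a sort-free fixpoint: starting from candidate 0, repeatedly scan the whole (unsorted) blacklist bumping the candidate past any interval that covers it, until a full pass changes nothing.
import Mathlib
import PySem

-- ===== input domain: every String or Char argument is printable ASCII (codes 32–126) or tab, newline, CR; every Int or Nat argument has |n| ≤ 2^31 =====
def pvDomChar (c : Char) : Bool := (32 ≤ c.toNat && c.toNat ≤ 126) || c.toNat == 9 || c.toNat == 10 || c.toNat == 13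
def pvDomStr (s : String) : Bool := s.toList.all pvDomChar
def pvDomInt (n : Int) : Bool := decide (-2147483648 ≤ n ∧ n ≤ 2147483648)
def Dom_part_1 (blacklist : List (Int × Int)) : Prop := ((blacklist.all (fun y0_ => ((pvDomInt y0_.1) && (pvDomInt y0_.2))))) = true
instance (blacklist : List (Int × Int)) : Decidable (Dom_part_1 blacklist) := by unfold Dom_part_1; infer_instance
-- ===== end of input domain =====

-- B replaces A's sort-then-single-merge by a sort-free fixpoint of repeated full scans
-- (objective: alternative algorithm, same return value; no speed claim).

-- ===== PORT A =====
-- for-loop with break over the sorted list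
def aLoop : List (Int × Int) → Int → Int
  | [], m => m
  | (l, h) :: rest, m => if m ≥ l then aLoop rest (max m (h + 1)) else m

def part_1 (blacklist : List (Int × Int)) : Int :=
  aLoop (PySem.List.sorted2 blacklist (fun p => p.1) (fun p => p.2)) 0

-- ===== PORT B =====
-- one full scan of the blacklist: the inner for-loop with the `changed` flag
def bPass : List (Int × Int) → Int → Bool → Int × Bool
  | [], c, ch => (c, ch)
  | p :: rest, c, ch =>
      if p.1 ≤ c ∧ c ≤ p.2 then bPass rest (p.2 + 1) true else bPass rest c ch

-- lemmas the port needs for termination (cited in decreasing_by)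
theorem bPass_le : ∀ (L : List (Int × Int)) (c : Int) (ch : Bool), c ≤ (bPass L c ch).1 := by
  intro L
  induction L with
  | nil => intro c ch; simp [bPass]
  | cons p rest ih =>
      intro c ch
      simp only [bPass]
      split_ifs with h
      · have := ih (p.2 + 1) true; omega
      · exact ih c ch

theorem bPass_progress : ∀ (L : List (Int × Int)) (c : Int) (ch : Bool),
    (bPass L c ch).2 = true → ch = true ∨ ∃ p ∈ L, c ≤ p.2 ∧ p.2 < (bPass L c ch).1 := by
  intro L
  induction L with
  | nil => intro c ch h; simp [bPass] at h; simp [h]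
  | cons p rest ih =>
      intro c ch h
      simp only [bPass] at h ⊢
      split_ifs at h ⊢ with hc
      · right
        refine ⟨p, by simp, hc.2, ?_⟩
        have := bPass_le rest (p.2 + 1) true
        omega
      · rcases ih c ch h with h' | ⟨q, hq, h1, h2⟩
        · exact Or.inl h'
        · exact Or.inr ⟨q, by simp [hq], h1, h2⟩

theorem pv_filter_length_lt {α : Type} (L : List α) (p q : α → Bool)
    (hw : ∀ x, q x = true → p x = true) (x : α) (hx : x ∈ L) (hp : p x = true) (hq : q x = false) :
    (L.filter q).length < (L.filter p).length := by
  induction L with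
  | nil => cases hx
  | cons y rest ih =>
      rcases List.mem_cons.mp hx with rfl | hx'
      · simp only [List.filter_cons, hp, hq]
        have : (rest.filter q).length ≤ (rest.filter p).length := by
          rw [← List.countP_eq_length_filter, ← List.countP_eq_length_filter]
          exact List.countP_mono_left (fun z _ hz => hw z hz)
        simp; omega
      · have := ih hx'
        simp only [List.filter_cons]
        by_cases hy : p y = true
        · simp [hy]
          by_cases hyq : q y = true
          · simp [hyq]; omega
          · simp [hyq]; omega
        · have hyq : q y = false := by
            cases hq' : q y
            · rfl
            · exact absurd (hw y hq') hy
          simp [hy, hyq]; omega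

-- outer while-changed loop
def bLoop (L : List (Int × Int)) (c : Int) : Int :=
  let r := bPass L c false
  if hr : r.2 = true then bLoop L r.1 else r.1
termination_by (L.filter (fun p => decide (c ≤ p.2))).length
decreasing_by
  rcases bPass_progress L c false hr with h | ⟨q, hq, h1, h2⟩
  · simp at h
  · exact pv_filter_length_lt L (fun p => decide (c ≤ p.2)) (fun p => decide ((bPass L c false).1 ≤ p.2))
      (by intro x hx; simp at hx ⊢; have := bPass_le L c false; omega)
      q hq (by simp [h1]) (by simp; omega)

def part_1_alt (blacklist : List (Int × Int)) : Int := bLoop blacklist 0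

-- ===== PRECONDITION & SPEC =====
def Spec_part_1 (blacklist : List (Int × Int)) (out : Int) : Prop := out = part_1_alt blacklist
instance (blacklist : List (Int × Int)) (out : Int) : Decidable (Spec_part_1 blacklist out) := by unfold Spec_part_1; infer_instance

-- ===== CLAIM (what is proved, stated in full; the proofs are below) =====
def Claim_equal_part_1 : Prop := ∀ (blacklist : List (Int × Int)), Dom_part_1 blacklist → Spec_part_1 blacklist (part_1 blacklist)

-- ===== LEMMAS AND PROOFS =====

-- x is blacklisted by some interval of L
def covered (L : List (Int × Int)) (x : Int) : Prop := ∃ p ∈ L, p.1 ≤ x ∧ x ≤ p.2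

theorem covered_of_perm {L L' : List (Int × Int)} (h : L.Perm L') (x : Int) :
    covered L x ↔ covered L' x := by
  unfold covered
  constructor <;> rintro ⟨p, hp, h1, h2⟩
  · exact ⟨p, h.mem_iff.mp hp, h1, h2⟩
  · exact ⟨p, h.mem_iff.mpr hp, h1, h2⟩

-- ---- B side ----

theorem bPass_true : ∀ (L : List (Int × Int)) (c : Int), (bPass L c true).2 = true := by
  intro L
  induction L with
  | nil => intro c; simp [bPass]
  | cons p rest ih => intro c; simp only [bPass]; split_ifs <;> exact ih _

theorem bPass_unchanged : ∀ (L : List (Int × Int)) (c : Int),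
    (bPass L c false).2 = false → (bPass L c false).1 = c ∧ ¬ covered L c := by
  intro L
  induction L with
  | nil => intro c _; exact ⟨rfl, by rintro ⟨p, hp, -, -⟩; cases hp⟩
  | cons p rest ih =>
      intro c h
      simp only [bPass] at h ⊢
      split_ifs at h ⊢ with hc
      · rw [bPass_true] at h; cases h
      · rcases ih c h with ⟨h1, h2⟩
        refine ⟨h1, ?_⟩
        rintro ⟨q, hq, hq1, hq2⟩
        rcases List.mem_cons.mp hq with rfl | hq'
        · exact hc ⟨hq1, hq2⟩
        · exact h2 ⟨q, hq', hq1, hq2⟩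

theorem bPass_covers : ∀ (L : List (Int × Int)) (c : Int) (ch : Bool) (x : Int),
    c ≤ x → x < (bPass L c ch).1 → covered L x := by
  intro L
  induction L with
  | nil => intro c ch x h1 h2; simp [bPass] at h2; omega
  | cons p rest ih =>
      intro c ch x h1 h2
      simp only [bPass] at h2
      split_ifs at h2 with hc
      · by_cases hx : x ≤ p.2
        · exact ⟨p, by simp, by omega, hx⟩
        · rcases ih (p.2 + 1) true x (by omega) h2 with ⟨q, hq, hq1, hq2⟩
          exact ⟨q, by simp [hq], hq1, hq2⟩
      · rcases ih c ch x h1 h2 with ⟨q, hq, hq1, hq2⟩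
        exact ⟨q, by simp [hq], hq1, hq2⟩

theorem bLoop_le (L : List (Int × Int)) (c : Int) : c ≤ bLoop L c := by
  refine bLoop.induct L (fun c => c ≤ bLoop L c) ?_ ?_ c
  · intro c r htrue ih
    show c ≤ bLoop L c
    rw [bLoop.eq_1]
    simp only [show (bPass L c false).2 = true from htrue, dite_true]
    have hih : (bPass L c false).1 ≤ bLoop L (bPass L c false).1 := ih
    have := bPass_le L c false
    omega
  · intro c r hfalse
    show c ≤ bLoop L c
    rw [bLoop.eq_1]
    simp only [show ¬ (bPass L c false).2 = true from hfalse]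
    exact bPass_le L c false

theorem bLoop_covers (L : List (Int × Int)) (c : Int) :
    ∀ x, c ≤ x → x < bLoop L c → covered L x := by
  refine bLoop.induct L (fun c => ∀ x, c ≤ x → x < bLoop L c → covered L x) ?_ ?_ c
  · intro c r htrue ih x h1 h2
    rw [bLoop.eq_1] at h2
    simp only [show (bPass L c false).2 = true from htrue, dite_true] at h2
    by_cases hx : x < (bPass L c false).1
    · exact bPass_covers L c false x h1 hx
    · have hih : ∀ y, (bPass L c false).1 ≤ y → y < bLoop L (bPass L c false).1 → covered L y := ih
      exact hih x (by omega) h2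
  · intro c r hfalse x h1 h2
    rw [bLoop.eq_1] at h2
    simp only [show ¬ (bPass L c false).2 = true from hfalse] at h2
    exact bPass_covers L c false x h1 h2

theorem bLoop_not_covered (L : List (Int × Int)) (c : Int) : ¬ covered L (bLoop L c) := by
  refine bLoop.induct L (fun c => ¬ covered L (bLoop L c)) ?_ ?_ c
  · intro c r htrue ih
    show ¬ covered L (bLoop L c)
    rw [bLoop.eq_1]; simp only [show (bPass L c false).2 = true from htrue, dite_true]
    exact (ih : ¬ covered L (bLoop L (bPass L c false).1))
  · intro c r hfalse
    show ¬ covered L (bLoop L c)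
    rw [bLoop.eq_1]; simp only [show ¬ (bPass L c false).2 = true from hfalse]
    rcases bPass_unchanged L c (by simpa using hfalse) with ⟨h1, h2⟩
    rw [h1]; exact h2

-- ---- A side ----

theorem aLoop_le : ∀ (S : List (Int × Int)) (m : Int), m ≤ aLoop S m := by
  intro S
  induction S with
  | nil => intro m; simp [aLoop]
  | cons p rest ih =>
      intro m
      rcases p with ⟨l, h⟩
      simp only [aLoop]
      split_ifs with hm
      · have := ih (max m (h + 1)); omega
      · omega

theorem aLoop_covers : ∀ (S : List (Int × Int)) (m : Int) (x : Int),
    m ≤ x → x < aLoop S m → covered S x := by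
  intro S
  induction S with
  | nil => intro m x h1 h2; simp [aLoop] at h2; omega
  | cons p rest ih =>
      intro m x h1 h2
      rcases p with ⟨l, h⟩
      simp only [aLoop] at h2
      split_ifs at h2 with hm
      · by_cases hx : x ≤ h
        · exact ⟨(l, h), by simp, by omega, hx⟩
        · rcases ih (max m (h + 1)) x (by omega) h2 with ⟨q, hq, hq1, hq2⟩
          exact ⟨q, by simp [hq], hq1, hq2⟩
      · omega

theorem aLoop_not_covered : ∀ (S : List (Int × Int)),
    S.Pairwise (fun a b => a.1 ≤ b.1) → ∀ (m : Int), ¬ covered S (aLoop S m) := by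
  intro S
  induction S with
  | nil => intro _ m; rintro ⟨p, hp, -, -⟩; cases hp
  | cons p rest ih =>
      intro hpw m
      rcases List.pairwise_cons.mp hpw with ⟨hhead, htail⟩
      rcases p with ⟨l, h⟩
      simp only [aLoop]
      split_ifs with hm
      · rintro ⟨q, hq, hq1, hq2⟩
        rcases List.mem_cons.mp hq with rfl | hq'
        · have := aLoop_le rest (max m (h + 1)); simp at hq2 ⊢; omega
        · exact ih htail (max m (h + 1)) ⟨q, hq', hq1, hq2⟩
      · rintro ⟨q, hq, hq1, hq2⟩
        rcases List.mem_cons.mp hq with rfl | hq'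
        · simp at hq1; omega
        · have := hhead q hq'; simp at this; omega

-- Python's key-less lexicographic insertion keeps the first components nondecreasing
theorem insertBy_fst_pairwise (x : Int × Int) (ys : List (Int × Int))
    (h : ys.Pairwise (fun a b => a.1 ≤ b.1)) :
    (PySem.List.insertBy
        (fun a b => decide (a.1 < b.1) || (!decide (b.1 < a.1) && decide (a.2 < b.2)))
        x ys).Pairwise (fun a b => a.1 ≤ b.1) := by
  induction ys with
  | nil => simp [PySem.List.insertBy]
  | cons y ys ih =>
      rcases List.pairwise_cons.mp h with ⟨hhead, htail⟩
      simp only [PySem.List.insertBy]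
      split_ifs with hlt
      · refine List.pairwise_cons.mpr ⟨?_, h⟩
        intro z hz
        have hxy : x.1 ≤ y.1 := by
          simp only [Bool.or_eq_true, Bool.and_eq_true, decide_eq_true_eq, Bool.not_eq_true',
            decide_eq_false_iff_not] at hlt
          rcases hlt with h' | ⟨h', -⟩ <;> omega
        rcases List.mem_cons.mp hz with rfl | hz'
        · exact hxy
        · have := hhead z hz'; omega
      · refine List.pairwise_cons.mpr ⟨?_, ih htail⟩
        intro z hz
        rcases (PySem.List.mem_insertBy _ _ _ _).mp hz with rfl | hz'
        · simp only [Bool.or_eq_true, Bool.and_eq_true, decide_eq_true_eq, Bool.not_eq_true',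
            decide_eq_false_iff_not] at hlt
          omega
        · exact hhead z hz'

theorem sorted2_fst_pairwise (bl : List (Int × Int)) :
    (PySem.List.sorted2 bl (fun p => p.1) (fun p => p.2)).Pairwise (fun a b => a.1 ≤ b.1) := by
  unfold PySem.List.sorted2
  simp only [if_neg (by simp : ¬ (false = true))]
  suffices hgen : ∀ (xs acc : List (Int × Int)), acc.Pairwise (fun a b => a.1 ≤ b.1) →
      (xs.foldl (fun acc x => PySem.List.insertBy
        (fun a b => decide (a.1 < b.1) || (!decide (b.1 < a.1) && decide (a.2 < b.2))) x acc)
        acc).Pairwise (fun a b => a.1 ≤ b.1) by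
    exact hgen bl [] (by simp)
  intro xs
  induction xs with
  | nil => intro acc h; simpa using h
  | cons x xs ih =>
      intro acc h
      exact ih _ (insertBy_fst_pairwise x acc h)

-- least-uncovered values are unique
theorem least_unique (L : List (Int × Int)) (r1 r2 : Int)
    (h1 : ¬ covered L r1) (h1' : ∀ x, 0 ≤ x → x < r1 → covered L x) (h10 : 0 ≤ r1)
    (h2 : ¬ covered L r2) (h2' : ∀ x, 0 ≤ x → x < r2 → covered L x) (h20 : 0 ≤ r2) :
    r1 = r2 := by
  rcases lt_trichotomy r1 r2 with h | h | h
  · exact absurd (h2' r1 h10 h) h1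
  · exact h
  · exact absurd (h1' r2 h20 h) h2

-- ===== VERDICT (by name: the statement is the Claim_ definition above) =====
theorem part_1_spec : Claim_equal_part_1 := by
  intro bl _
  unfold Spec_part_1 part_1 part_1_alt
  have hperm : (PySem.List.sorted2 bl (fun p => p.1) (fun p => p.2)).Perm bl :=
    PySem.List.sorted2_perm bl _ _ _
  have hcov := fun x => covered_of_perm hperm x
  apply least_unique bl
  · intro hc
    exact aLoop_not_covered _ (sorted2_fst_pairwise bl) 0 ((hcov _).mpr hc)
  · intro x h0 hx
    exact (hcov x).mp (aLoop_covers _ 0 x h0 hx)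
  · exact aLoop_le _ 0
  · exact bLoop_not_covered bl 0
  · intro x h0 hx
    exact bLoop_covers bl 0 x h0 hx
  · exact bLoop_le bl 0
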